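-- pv_equiv track=rewrite | github.com/neerajsinghjr/dsa | leetcode/Leetcode_Streaks/2022/09.Streaks/P21_Sum_Of_Even_Number_By_Queries.py | ansv1
-- ===== SOURCE A (Python) =====
-- def ansv1(nums, que, n):
--     res = []          # result: array of new even sum;
--     evenSum = sum(x for x in nums if(x%2 == 0))
--
--     for (val,idx) in que:
--         # p1: Fallback $evenSum for current num;
--         evenSum -= nums[idx] if(nums[idx]%2 == 0) else 0
--         nums[idx] = nums[idx] + val
--         # p2: Update $evenSum for current even num;
--         if(nums[idx]%2 == 0): evenSum += nums[idx]
--         # p3: result;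
--         res.append(evenSum)
--
--     return res
-- ===== SOURCE B (Python) =====
-- def ansv1(nums, que, n):
--     # Simpler brute force: apply each update in place, then recompute the
--     # even sum from scratch (no incremental bookkeeping).
--     res = []
--     for val, idx in que:
--         nums[idx] = nums[idx] + val
--         res.append(sum(x for x in nums if x % 2 == 0))
--     return res
-- ===== Notes on version B (the rewrite author's own statement) =====
-- stated objective: simpler
-- what changed: Replaces A's incremental O(1) even-sum bookkeeping (subtract old even value, add new even value) with a full rescan of nums after each update, recomputing the even sum from scratch per query.
-- outside the precondition, e.g. on ansv1([1, 2], [(5, 7)], 2): A raises IndexError, B raises IndexError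
import Mathlib
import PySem

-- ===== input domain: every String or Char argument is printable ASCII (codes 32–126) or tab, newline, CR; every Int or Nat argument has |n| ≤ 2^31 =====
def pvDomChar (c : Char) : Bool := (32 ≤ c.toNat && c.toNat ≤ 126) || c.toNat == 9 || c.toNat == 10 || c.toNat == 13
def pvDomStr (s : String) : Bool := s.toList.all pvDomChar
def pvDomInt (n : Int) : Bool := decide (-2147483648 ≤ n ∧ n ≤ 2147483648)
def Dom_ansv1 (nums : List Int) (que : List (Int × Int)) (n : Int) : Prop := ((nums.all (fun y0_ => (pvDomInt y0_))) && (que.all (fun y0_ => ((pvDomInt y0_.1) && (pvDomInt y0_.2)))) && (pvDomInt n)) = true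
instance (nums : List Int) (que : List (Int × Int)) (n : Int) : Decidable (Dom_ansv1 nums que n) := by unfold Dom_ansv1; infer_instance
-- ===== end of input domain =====

-- B drops A's incremental even-sum bookkeeping and recomputes the even sum by a
-- full rescan after every in-place update (simpler, not faster).  Both A and B
-- mutate nums in place; the equivalence proved here is about the return value.

-- ===== PORT A =====
-- A's loop: state is (current nums, running evenSum, accumulated res).
def ansv1Loop (ns : List Int) (es : Int) (res : List Int) : List (Int × Int) → List Int
  | [] => res
  | (val, idx) :: rest =>
      let cur := PySem.List.pyGetD ns idx 0
      let es1 := es - (if PySem.Int.mod cur 2 == 0 then cur else 0)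
      let ns1 := PySem.List.pySetD ns idx (cur + val)
      let newv := PySem.List.pyGetD ns1 idx 0
      let es2 := if PySem.Int.mod newv 2 == 0 then es1 + newv else es1
      ansv1Loop ns1 es2 (res ++ [es2]) rest

def ansv1 (nums : List Int) (que : List (Int × Int)) (n : Int) : List Int :=
  ansv1Loop nums ((nums.filter (fun x => PySem.Int.mod x 2 == 0)).sum) [] que

-- ===== PORT B =====
-- B's even-sum rescan: sum(x for x in nums if x % 2 == 0)
def evSumB (ns : List Int) : Int := (ns.filter (fun x => PySem.Int.mod x 2 == 0)).sum

def ansv1AltLoop (ns : List Int) (res : List Int) : List (Int × Int) → List Int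
  | [] => res
  | (val, idx) :: rest =>
      let ns1 := PySem.List.pySetD ns idx (PySem.List.pyGetD ns idx 0 + val)
      ansv1AltLoop ns1 (res ++ [evSumB ns1]) rest

def ansv1_alt (nums : List Int) (que : List (Int × Int)) (n : Int) : List Int :=
  ansv1AltLoop nums [] que

-- ===== PRECONDITION & SPEC =====
-- Pre_ excludes exactly the inputs where nums[idx] raises IndexError (some query
-- index out of range); B raises the same way there.
def Pre_ansv1 (nums : List Int) (que : List (Int × Int)) (n : Int) : Prop :=
  ∀ p ∈ que, PySem.Raise.InRange nums.length p.2
instance (nums : List Int) (que : List (Int × Int)) (n : Int) : Decidable (Pre_ansv1 nums que n) := by unfold Pre_ansv1; infer_instance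

def pvWitness_ansv1 : List Int × (List (Int × Int)) × Int := ([1, 2, 3], [(1, 0), (-2, 2), (3, -1)], 3)

def Spec_ansv1 (nums : List Int) (que : List (Int × Int)) (n : Int) (out : List Int) : Prop := out = ansv1_alt nums que n
instance (nums : List Int) (que : List (Int × Int)) (n : Int) (out : List Int) : Decidable (Spec_ansv1 nums que n out) := by unfold Spec_ansv1; infer_instance

-- ===== CLAIM (what is proved, stated in full; the proofs are below) =====
def Claim_equal_ansv1 : Prop := ∀ (nums : List Int) (que : List (Int × Int)) (n : Int), Dom_ansv1 nums que n → Pre_ansv1 nums que n → Spec_ansv1 nums que n (ansv1 nums que n)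

-- ===== LEMMAS AND PROOFS =====

theorem pvWitness_ok : Dom_ansv1 pvWitness_ansv1.1 pvWitness_ansv1.2.1 pvWitness_ansv1.2.2 ∧
    Pre_ansv1 pvWitness_ansv1.1 pvWitness_ansv1.2.1 pvWitness_ansv1.2.2 := by
  constructor <;> decide

theorem evSumB_cons (x : Int) (xs : List Int) :
    evSumB (x :: xs) = (if PySem.Int.mod x 2 == 0 then x else 0) + evSumB xs := by
  unfold evSumB
  simp only [List.filter_cons]
  split_ifs <;> simp

theorem evSumB_set : ∀ (ns : List Int) (k : Nat) (hk : k < ns.length) (v : Int),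
    evSumB (ns.set k v)
      = evSumB ns - (if PySem.Int.mod ns[k] 2 == 0 then ns[k] else 0)
        + (if PySem.Int.mod v 2 == 0 then v else 0) := by
  intro ns
  induction ns with
  | nil => intro k hk; simp at hk
  | cons x xs ih =>
      intro k hk v
      cases k with
      | zero =>
          simp only [List.set, evSumB_cons, List.getElem_cons_zero]
          ring
      | succ m =>
          have hm : m < xs.length := by simpa using hk
          simp only [List.set, evSumB_cons, List.getElem_cons_succ, ih m hm v]
          ring

theorem pyIdx_of_inRange (len : Nat) (i : Int) (h : PySem.Raise.InRange len i) :
    ∃ k : Nat, k < len ∧ PySem.List.pyIdx? len i = some k := by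
  obtain ⟨h1, h2⟩ := h
  unfold PySem.List.pyIdx?
  by_cases h0 : 0 ≤ i
  · exact ⟨i.toNat, by omega, by simp [h0, h2]⟩
  · refine ⟨len - (-i).toNat, by omega, by simp [h0, h1]⟩

theorem loop_eq : ∀ (que : List (Int × Int)) (ns : List Int) (res : List Int),
    (∀ p ∈ que, PySem.Raise.InRange ns.length p.2) →
    ansv1Loop ns (evSumB ns) res que = ansv1AltLoop ns res que := by
  intro que
  induction que with
  | nil => intro ns res _; rfl
  | cons q rest ih =>
      intro ns res hpre
      obtain ⟨val, idx⟩ := q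
      obtain ⟨k, hk, hidx⟩ := pyIdx_of_inRange ns.length idx (hpre (val, idx) (by simp))
      have hget : PySem.List.pyGetD ns idx 0 = ns[k] := by
        simp [PySem.List.pyGetD, PySem.List.pyGet?, hidx, hk]
      have hset : PySem.List.pySetD ns idx (ns[k] + val) = ns.set k (ns[k] + val) := by
        simp [PySem.List.pySetD, PySem.List.pySet?, hidx]
      have hlen : (ns.set k (ns[k] + val)).length = ns.length := by simp
      have hget2 : PySem.List.pyGetD (ns.set k (ns[k] + val)) idx 0 = ns[k] + val := by
        simp [PySem.List.pyGetD, PySem.List.pyGet?, hlen, hidx, hk]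
      have hes : (if PySem.Int.mod (ns[k] + val) 2 == 0
            then (evSumB ns - (if PySem.Int.mod ns[k] 2 == 0 then ns[k] else 0)) + (ns[k] + val)
            else evSumB ns - (if PySem.Int.mod ns[k] 2 == 0 then ns[k] else 0))
          = evSumB (ns.set k (ns[k] + val)) := by
        rw [evSumB_set ns k hk (ns[k] + val)]
        split_ifs <;> ring
      show ansv1Loop ns (evSumB ns) res ((val, idx) :: rest) = _
      simp only [ansv1Loop, ansv1AltLoop, hget, hset, hget2, hes]
      exact ih (ns.set k (ns[k] + val)) _ (fun p hp => by
        rw [hlen]; exact hpre p (List.mem_cons_of_mem _ hp))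

-- ===== VERDICT (by name: the statement is the Claim_ definition above) =====
theorem ansv1_spec : Claim_equal_ansv1 := by
  intro nums que n _ hpre
  unfold Spec_ansv1 ansv1 ansv1_alt
  exact loop_eq que nums [] hpre
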